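-- pv_equiv track=rewrite | github.com/starfuryone/agoraiq-signals | bot/cards.py | provider_list_card
-- ===== SOURCE A (Python) =====
-- def _e(text: str) -> str:
--     for ch in r"_*[]()~`>#+-=|{}.!":
--         text = text.replace(ch, f"\\{ch}")
--     return text
--
-- def _b(text: str) -> str:
--     return f"*{_e(str(text))}*"
--
-- def provider_list_card(providers, page=1, total=0):
--     lines = [f"📋 {_b('Signal Providers')} \({_e(str(total))} total\)\n"]
--     tier_order = {"ELITE": 0, "VERIFIED": 1, "BETA": 2, "PENDING": 3}
--     sorted_p = sorted(providers, key=lambda x: tier_order.get(x.get("marketplace_tier", "PENDING"), 9))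
--     for p in sorted_p[:15]:
--         name  = p.get("name", "?")
--         tier  = p.get("marketplace_tier", "PENDING")
--         mkt   = p.get("market_type") or ""
--         badge = {"ELITE": "💎", "VERIFIED": "✅", "BETA": "🧪", "PENDING": "⚪"}.get(tier, "⚪")
--         mkt_str = f" · {_e(mkt)}" if mkt else ""
--         lines.append(f"{badge} {_b(_e(name))}{mkt_str}")
--     lines.append("")
--     lines.append("Use /provider NAME for full intelligence card")
--     return "\n".join(lines)
-- ===== SOURCE B (Python) =====
-- def _e(text: str) -> str:
--     out = []
--     for c in text:
--         if c in "_*[]()~`>#+-=|{}.!":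
--             out.append("\\")
--         out.append(c)
--     return "".join(out)
--
-- def _b(text: str) -> str:
--     return "*" + _e(str(text)) + "*"
--
-- def provider_list_card(providers, page=1, total=0):
--     tier_rank = {"ELITE": 0, "VERIFIED": 1, "BETA": 2, "PENDING": 3}
--     buckets = ([], [], [], [], [])  # ELITE, VERIFIED, BETA, PENDING, unknown tier
--     for p in providers:
--         buckets[tier_rank.get(p.get("marketplace_tier", "PENDING"), 4)].append(p)
--     ordered = buckets[0] + buckets[1] + buckets[2] + buckets[3] + buckets[4]
--     badges = {"ELITE": "\U0001F48E", "VERIFIED": "\u2705", "BETA": "\U0001F9EA", "PENDING": "\u26AA"}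
--     body = ""
--     for p in ordered[:15]:
--         tier = p.get("marketplace_tier", "PENDING")
--         mkt = p.get("market_type") or ""
--         line = badges.get(tier, "\u26AA") + " " + _b(_e(p.get("name", "?")))
--         if mkt:
--             line += " \u00B7 " + _e(mkt)
--         body += "\n" + line
--     return ("\U0001F4CB " + _b("Signal Providers") + " \\(" + _e(str(total)) + " total\\)\n"
--             + body + "\n\nUse /provider NAME for full intelligence card")
-- ===== Notes on version B (the rewrite author's own statement) =====
-- stated objective: alternative
-- what changed: Replaces sorted(providers, key=tier_rank) by a single bucketing pass into five tier buckets concatenated in rank order (stable order preserved), replaces the per-special-character replace() chain in _e by a one-pass per-character escaper, and builds the card by direct string concatenation instead of collecting lines and joining.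
import Mathlib
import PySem

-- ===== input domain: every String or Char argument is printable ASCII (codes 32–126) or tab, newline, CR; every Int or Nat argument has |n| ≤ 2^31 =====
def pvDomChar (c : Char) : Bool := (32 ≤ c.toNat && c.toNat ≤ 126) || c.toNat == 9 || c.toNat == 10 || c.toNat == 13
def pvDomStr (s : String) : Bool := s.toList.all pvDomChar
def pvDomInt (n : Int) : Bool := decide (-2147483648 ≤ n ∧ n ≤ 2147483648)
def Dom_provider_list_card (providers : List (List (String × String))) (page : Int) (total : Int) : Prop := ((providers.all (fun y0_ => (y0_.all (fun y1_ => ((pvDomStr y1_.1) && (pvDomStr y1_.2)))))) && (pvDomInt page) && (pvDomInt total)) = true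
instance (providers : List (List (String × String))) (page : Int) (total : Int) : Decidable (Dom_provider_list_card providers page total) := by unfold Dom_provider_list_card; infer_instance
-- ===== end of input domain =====

-- B replaces the stable sort by tier rank with one bucketing pass (5 buckets concatenated in rank
-- order) and builds the card by direct string concatenation with a single-pass character escaper;
-- objective: alternative (no measured speed claim).

-- shared tiny helper: Python dict.get(k, d) on a provider record (first-match lookup)
def pvGet (p : List (String × String)) (k d : String) : String :=
  PySem.Dict.getD (PySem.Dict.mk p) k d

-- ===== PORT A =====
-- _e: sequential str.replace over each special character
def escA (t : List Char) : List Char :=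
  "_*[]()~`>#+-=|{}.!".toList.foldl (fun s ch => PySem.Chars.replace s [ch] ['\\', ch]) t

def bA (t : List Char) : List Char := ['*'] ++ escA t ++ ['*']

def tierOrderA : PySem.Dict String Int :=
  PySem.Dict.mk [("ELITE", 0), ("VERIFIED", 1), ("BETA", 2), ("PENDING", 3)]

-- the sort key lambda of A
def keyA (p : List (String × String)) : Int :=
  PySem.Dict.getD tierOrderA (pvGet p "marketplace_tier" "PENDING") 9

def badgeA : PySem.Dict String String :=
  PySem.Dict.mk [("ELITE", "💎"), ("VERIFIED", "✅"), ("BETA", "🧪"), ("PENDING", "⚪")]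

-- body of A's for-loop: the line appended for one provider
def fmtA (p : List (String × String)) : List Char :=
  let name := pvGet p "name" "?"
  let tier := pvGet p "marketplace_tier" "PENDING"
  let mkt := ((PySem.Dict.mk p).get? "market_type").getD ""   -- p.get("market_type") or ""
  let badge := PySem.Dict.getD badgeA tier "⚪"
  let mktStr := if mkt ≠ "" then " · ".toList ++ escA mkt.toList else []
  badge.toList ++ [' '] ++ bA (escA name.toList) ++ mktStr

def provider_list_card (providers : List (List (String × String))) (page : Int) (total : Int) : String :=
  let header := "📋 ".toList ++ bA "Signal Providers".toList ++ " \\(".toList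
      ++ escA (PySem.Int.toChars total) ++ " total\\)\n".toList
  let sorted_p := PySem.List.sorted providers keyA false
  let lines := (PySem.List.slice sorted_p none (some 15)).foldl
      (fun ls p => ls ++ [fmtA p]) [header]
  let lines := lines ++ [[]]
  let lines := lines ++ ["Use /provider NAME for full intelligence card".toList]
  String.ofList (PySem.Chars.join ['\n'] lines)

-- ===== PORT B =====
-- _e of B: one pass over the characters
def escB (t : List Char) : List Char :=
  t.foldl (fun out c =>
    if "_*[]()~`>#+-=|{}.!".toList.contains c then out ++ ['\\', c] else out ++ [c]) []

def bB (t : List Char) : List Char := ['*'] ++ escB t ++ ['*']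

def tierRankB : PySem.Dict String Int :=
  PySem.Dict.mk [("ELITE", 0), ("VERIFIED", 1), ("BETA", 2), ("PENDING", 3)]

def idxB (p : List (String × String)) : Int :=
  PySem.Dict.getD tierRankB (pvGet p "marketplace_tier" "PENDING") 4

-- Source B's 5-tuple of buckets; buckets[i].append(p) (i is always 0..4)
def pushB (b : List (List (String × String)) × List (List (String × String)) × List (List (String × String)) × List (List (String × String)) × List (List (String × String)))
    (i : Int) (p : List (String × String)) :
    List (List (String × String)) × List (List (String × String)) × List (List (String × String)) × List (List (String × String)) × List (List (String × String)) :=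
  if i = 0 then (b.1 ++ [p], b.2.1, b.2.2.1, b.2.2.2.1, b.2.2.2.2)
  else if i = 1 then (b.1, b.2.1 ++ [p], b.2.2.1, b.2.2.2.1, b.2.2.2.2)
  else if i = 2 then (b.1, b.2.1, b.2.2.1 ++ [p], b.2.2.2.1, b.2.2.2.2)
  else if i = 3 then (b.1, b.2.1, b.2.2.1, b.2.2.2.1 ++ [p], b.2.2.2.2)
  else (b.1, b.2.1, b.2.2.1, b.2.2.2.1, b.2.2.2.2 ++ [p])

def badgeB : PySem.Dict String String :=
  PySem.Dict.mk [("ELITE", "💎"), ("VERIFIED", "✅"), ("BETA", "🧪"), ("PENDING", "⚪")]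

-- body of B's for-loop: the line for one provider (badge, name, optional market type)
def lineB (p : List (String × String)) : List Char :=
  let tier := pvGet p "marketplace_tier" "PENDING"
  let mkt := ((PySem.Dict.mk p).get? "market_type").getD ""
  let line := (PySem.Dict.getD badgeB tier "⚪").toList ++ [' '] ++ bB (escB (pvGet p "name" "?").toList)
  if mkt ≠ "" then line ++ " · ".toList ++ escB mkt.toList else line

def provider_list_card_alt (providers : List (List (String × String))) (page : Int) (total : Int) : String :=
  let buckets := providers.foldl (fun b p => pushB b (idxB p) p) ([], [], [], [], [])
  let ordered := buckets.1 ++ buckets.2.1 ++ buckets.2.2.1 ++ buckets.2.2.2.1 ++ buckets.2.2.2.2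
  let body := (PySem.List.slice ordered none (some 15)).foldl
      (fun body p => body ++ '\n' :: lineB p) []
  String.ofList ("📋 ".toList ++ bB "Signal Providers".toList ++ " \\(".toList
      ++ escB (PySem.Int.toChars total) ++ " total\\)\n".toList
      ++ body ++ "\n\nUse /provider NAME for full intelligence card".toList)

-- ===== PRECONDITION & SPEC =====
def Spec_provider_list_card (providers : List (List (String × String))) (page : Int) (total : Int) (out : String) : Prop := out = provider_list_card_alt providers page total
instance (providers : List (List (String × String))) (page : Int) (total : Int) (out : String) : Decidable (Spec_provider_list_card providers page total out) := by unfold Spec_provider_list_card; infer_instance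

-- ===== CLAIM (what is proved, stated in full; the proofs are below) =====
def Claim_equal_provider_list_card : Prop := ∀ (providers : List (List (String × String))) (page : Int) (total : Int), Dom_provider_list_card providers page total → Spec_provider_list_card providers page total (provider_list_card providers page total)

-- ===== LEMMAS AND PROOFS =====

-- A's _e: one str.replace with a single-character pattern is a per-character substitution
lemma go_single (c : Char) (new : List Char) :
    ∀ (fuel : Nat) (l acc : List Char), l.length ≤ fuel →
      PySem.Chars.replace.go [c] new fuel l acc
        = acc.reverse ++ l.flatMap (fun x => if x = c then new else [x]) := by
  intro fuel
  induction fuel with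
  | zero => intro l acc h; cases l <;> simp_all [PySem.Chars.replace.go]
  | succ n ih =>
    intro l acc h
    cases l with
    | nil => simp [PySem.Chars.replace.go]
    | cons x t =>
      rw [PySem.Chars.replace.go]
      by_cases hx : x = c
      · subst hx
        simp only [List.isPrefixOf_cons₂, List.isPrefixOf_nil_left, Bool.and_true, BEq.rfl, if_pos]
        rw [ih _ _ (by simpa using Nat.le_of_succ_le_succ h)]
        simp
      · have hpre : [c].isPrefixOf (x :: t) = false := by
          simp [List.isPrefixOf_cons₂]
          exact fun h' => hx h'.symm
        rw [hpre]
        simp only [Bool.false_eq_true, if_neg, not_false_iff]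
        rw [ih _ _ (by simpa using Nat.le_of_succ_le_succ h)]
        simp [hx]

lemma replace_single (s : List Char) (c : Char) (new : List Char) :
    PySem.Chars.replace s [c] new = s.flatMap (fun x => if x = c then new else [x]) := by
  rw [PySem.Chars.replace]
  simp [go_single c new s.length s [] le_rfl]

-- folding single-character replaces over distinct specials (none of them '\') = one-pass substitution
lemma foldl_replace_eq_flatMap (S : List Char) (hb : '\\' ∉ S) (hnd : S.Nodup) :
    ∀ t : List Char,
      S.foldl (fun s ch => PySem.Chars.replace s [ch] ['\\', ch]) t
        = t.flatMap (fun c => if S.contains c then ['\\', c] else [c]) := by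
  induction S with
  | nil => intro t; simp
  | cons c S' ih =>
    intro t
    have hb' : '\\' ∉ S' := fun h => hb (List.mem_cons_of_mem _ h)
    have hc' : c ∉ S' := (List.nodup_cons.mp hnd).1
    simp only [List.foldl_cons]
    rw [ih hb' (List.nodup_cons.mp hnd).2, replace_single, List.flatMap_assoc]
    apply List.flatMap_congr
    intro x _
    by_cases hx : x = c
    · subst hx
      simp [hb', hc']
    · by_cases hm : S'.contains x <;> simp [hm, hx]

-- the two escapers agree
lemma esc_eq (t : List Char) : escA t = escB t := by
  unfold escA escB
  have h1 := foldl_replace_eq_flatMap "_*[]()~`>#+-=|{}.!".toList (by decide) (by decide) t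
  rw [h1]
  have h2 : (fun (out : List Char) (c : Char) =>
      if "_*[]()~`>#+-=|{}.!".toList.contains c then out ++ ['\\', c] else out ++ [c])
      = fun out c => out ++ (if "_*[]()~`>#+-=|{}.!".toList.contains c then ['\\', c] else [c]) := by
    funext out c; split <;> rfl
  rw [h2, PySem.List.foldl_append_eq_flatMap]
  simp

lemma b_eq (t : List Char) : bA t = bB t := by
  unfold bA bB; rw [esc_eq]

-- joint case analysis of A's sort key and B's bucket index
lemma key_idx_cases (p : List (String × String)) :
    (keyA p = 0 ∧ idxB p = 0) ∨ (keyA p = 1 ∧ idxB p = 1) ∨ (keyA p = 2 ∧ idxB p = 2)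
      ∨ (keyA p = 3 ∧ idxB p = 3) ∨ (keyA p = 9 ∧ idxB p = 4) := by
  unfold keyA idxB tierOrderA tierRankB
  generalize pvGet p "marketplace_tier" "PENDING" = t
  by_cases h1 : ("ELITE" : String) == t <;> by_cases h2 : ("VERIFIED" : String) == t <;>
    by_cases h3 : ("BETA" : String) == t <;> by_cases h4 : ("PENDING" : String) == t <;>
      simp [PySem.Dict.getD, PySem.Dict.get?_mk_cons, PySem.Dict.get?, h1, h2, h3, h4]

-- insertBy of x into A ++ C, x after all of A and before all of C
lemma insertBy_mid (before : (List (String × String)) → (List (String × String)) → Bool)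
    (x : List (String × String)) (A C : List (List (String × String)))
    (hA : ∀ a ∈ A, before x a = false) (hC : ∀ a ∈ C, before x a = true) :
    PySem.List.insertBy before x (A ++ C) = A ++ x :: C := by
  induction A with
  | nil =>
    simp only [List.nil_append]
    cases C with
    | nil => rfl
    | cons c t =>
      rw [PySem.List.insertBy]
      simp [hC c (List.mem_cons_self)]
  | cons a A' ih =>
    rw [List.cons_append, PySem.List.insertBy]
    rw [hA a (List.mem_cons_self)]
    simp only [Bool.false_eq_true, if_neg, not_false_iff, List.cons_append]
    rw [ih (fun y hy => hA y (List.mem_cons_of_mem _ hy))]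

-- the stable sort by keyA is the concatenation of the five key buckets, in input order
lemma sorted_buckets (xs : List (List (String × String))) :
    PySem.List.sorted xs keyA false =
      xs.filter (fun p => keyA p == 0) ++ xs.filter (fun p => keyA p == 1)
        ++ xs.filter (fun p => keyA p == 2) ++ xs.filter (fun p => keyA p == 3)
        ++ xs.filter (fun p => keyA p == 9) := by
  induction xs using List.reverseRecOn with
  | nil => simp [PySem.List.sorted]
  | append_singleton xs x ih =>
    have hstep : PySem.List.sorted (xs ++ [x]) keyA false
        = PySem.List.insertBy (fun a b => decide (keyA a < keyA b)) x
            (PySem.List.sorted xs keyA false) := by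
      rw [PySem.List.sorted_eq_foldl_insertBy, PySem.List.sorted_eq_foldl_insertBy,
        List.foldl_append]
      rfl
    have hmem : ∀ (i : Int) (a : List (String × String)),
        a ∈ xs.filter (fun p => keyA p == i) → keyA a = i := by
      intro i a ha
      simpa using (List.mem_filter.mp ha).2
    rw [hstep, ih]
    rcases key_idx_cases x with ⟨h, _⟩ | ⟨h, _⟩ | ⟨h, _⟩ | ⟨h, _⟩ | ⟨h, _⟩
    · have e := insertBy_mid (fun a b => decide (keyA a < keyA b)) x
        (xs.filter (fun p => keyA p == 0))
        (xs.filter (fun p => keyA p == 1) ++ xs.filter (fun p => keyA p == 2)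
          ++ xs.filter (fun p => keyA p == 3) ++ xs.filter (fun p => keyA p == 9))
        (fun a ha => by simp [h, hmem 0 a ha])
        (fun a ha => by
          rcases List.mem_append.mp ha with ha' | ha'
          · rcases List.mem_append.mp ha' with ha'' | ha''
            · rcases List.mem_append.mp ha'' with h3 | h3
              · simp [h, hmem 1 a h3]
              · simp [h, hmem 2 a h3]
            · simp [h, hmem 3 a ha'']
          · simp [h, hmem 9 a ha'])
      rw [show xs.filter (fun p => keyA p == (0:Int)) ++ xs.filter (fun p => keyA p == 1)
          ++ xs.filter (fun p => keyA p == 2) ++ xs.filter (fun p => keyA p == 3)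
          ++ xs.filter (fun p => keyA p == 9)
        = xs.filter (fun p => keyA p == (0:Int)) ++ (xs.filter (fun p => keyA p == 1)
          ++ xs.filter (fun p => keyA p == 2) ++ xs.filter (fun p => keyA p == 3)
          ++ xs.filter (fun p => keyA p == 9)) from by simp [List.append_assoc], e]
      simp [List.filter_append, List.filter_cons, h, List.append_assoc]
    · have e := insertBy_mid (fun a b => decide (keyA a < keyA b)) x
        (xs.filter (fun p => keyA p == 0) ++ xs.filter (fun p => keyA p == 1))
        (xs.filter (fun p => keyA p == 2) ++ xs.filter (fun p => keyA p == 3)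
          ++ xs.filter (fun p => keyA p == 9))
        (fun a ha => by
          rcases List.mem_append.mp ha with ha' | ha'
          · simp [h, hmem 0 a ha']
          · simp [h, hmem 1 a ha'])
        (fun a ha => by
          rcases List.mem_append.mp ha with ha' | ha'
          · rcases List.mem_append.mp ha' with h3 | h3
            · simp [h, hmem 2 a h3]
            · simp [h, hmem 3 a h3]
          · simp [h, hmem 9 a ha'])
      rw [show xs.filter (fun p => keyA p == (0:Int)) ++ xs.filter (fun p => keyA p == 1)
          ++ xs.filter (fun p => keyA p == 2) ++ xs.filter (fun p => keyA p == 3)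
          ++ xs.filter (fun p => keyA p == 9)
        = (xs.filter (fun p => keyA p == (0:Int)) ++ xs.filter (fun p => keyA p == 1))
          ++ (xs.filter (fun p => keyA p == 2) ++ xs.filter (fun p => keyA p == 3)
          ++ xs.filter (fun p => keyA p == 9)) from by simp [List.append_assoc], e]
      simp [List.filter_append, List.filter_cons, h, List.append_assoc]
    · have e := insertBy_mid (fun a b => decide (keyA a < keyA b)) x
        (xs.filter (fun p => keyA p == 0) ++ xs.filter (fun p => keyA p == 1)
          ++ xs.filter (fun p => keyA p == 2))
        (xs.filter (fun p => keyA p == 3) ++ xs.filter (fun p => keyA p == 9))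
        (fun a ha => by
          rcases List.mem_append.mp ha with ha' | ha'
          · rcases List.mem_append.mp ha' with h3 | h3
            · simp [h, hmem 0 a h3]
            · simp [h, hmem 1 a h3]
          · simp [h, hmem 2 a ha'])
        (fun a ha => by
          rcases List.mem_append.mp ha with ha' | ha'
          · simp [h, hmem 3 a ha']
          · simp [h, hmem 9 a ha'])
      rw [show xs.filter (fun p => keyA p == (0:Int)) ++ xs.filter (fun p => keyA p == 1)
          ++ xs.filter (fun p => keyA p == 2) ++ xs.filter (fun p => keyA p == 3)
          ++ xs.filter (fun p => keyA p == 9)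
        = (xs.filter (fun p => keyA p == (0:Int)) ++ xs.filter (fun p => keyA p == 1)
          ++ xs.filter (fun p => keyA p == 2)) ++ (xs.filter (fun p => keyA p == 3)
          ++ xs.filter (fun p => keyA p == 9)) from by simp [List.append_assoc], e]
      simp [List.filter_append, List.filter_cons, h, List.append_assoc]
    · have e := insertBy_mid (fun a b => decide (keyA a < keyA b)) x
        (xs.filter (fun p => keyA p == 0) ++ xs.filter (fun p => keyA p == 1)
          ++ xs.filter (fun p => keyA p == 2) ++ xs.filter (fun p => keyA p == 3))
        (xs.filter (fun p => keyA p == 9))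
        (fun a ha => by
          rcases List.mem_append.mp ha with ha' | ha'
          · rcases List.mem_append.mp ha' with h3 | h3
            · rcases List.mem_append.mp h3 with h4 | h4
              · simp [h, hmem 0 a h4]
              · simp [h, hmem 1 a h4]
            · simp [h, hmem 2 a h3]
          · simp [h, hmem 3 a ha'])
        (fun a ha => by simp [h, hmem 9 a ha])
      rw [show xs.filter (fun p => keyA p == (0:Int)) ++ xs.filter (fun p => keyA p == 1)
          ++ xs.filter (fun p => keyA p == 2) ++ xs.filter (fun p => keyA p == 3)
          ++ xs.filter (fun p => keyA p == 9)
        = (xs.filter (fun p => keyA p == (0:Int)) ++ xs.filter (fun p => keyA p == 1)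
          ++ xs.filter (fun p => keyA p == 2) ++ xs.filter (fun p => keyA p == 3))
          ++ xs.filter (fun p => keyA p == 9) from by simp [List.append_assoc], e]
      simp [List.filter_append, List.filter_cons, h, List.append_assoc]
    · have e := PySem.List.insertBy_of_forall_not_before
        (fun a b => decide (keyA a < keyA b)) x
        (xs.filter (fun p => keyA p == 0) ++ xs.filter (fun p => keyA p == 1)
          ++ xs.filter (fun p => keyA p == 2) ++ xs.filter (fun p => keyA p == 3)
          ++ xs.filter (fun p => keyA p == 9))
        (fun a ha => by
          rcases List.mem_append.mp ha with ha' | ha'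
          · rcases List.mem_append.mp ha' with h3 | h3
            · rcases List.mem_append.mp h3 with h4 | h4
              · rcases List.mem_append.mp h4 with h5 | h5
                · simp [h, hmem 0 a h5]
                · simp [h, hmem 1 a h5]
              · simp [h, hmem 2 a h4]
            · simp [h, hmem 3 a h3]
          · simp [h, hmem 9 a ha'])
      rw [e]
      simp [List.filter_append, List.filter_cons, h, List.append_assoc]

-- B's bucketing pass computes the five key buckets
lemma buckets_spec (xs : List (List (String × String)))
    (b0 b1 b2 b3 b4 : List (List (String × String))) :
    xs.foldl (fun b p => pushB b (idxB p) p) (b0, b1, b2, b3, b4)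
      = (b0 ++ xs.filter (fun p => idxB p == 0), b1 ++ xs.filter (fun p => idxB p == 1),
         b2 ++ xs.filter (fun p => idxB p == 2), b3 ++ xs.filter (fun p => idxB p == 3),
         b4 ++ xs.filter (fun p => idxB p == 4)) := by
  induction xs generalizing b0 b1 b2 b3 b4 with
  | nil => simp
  | cons p xs ih =>
    simp only [List.foldl_cons]
    rcases key_idx_cases p with ⟨_, h⟩ | ⟨_, h⟩ | ⟨_, h⟩ | ⟨_, h⟩ | ⟨_, h⟩
    · have hp : pushB (b0, b1, b2, b3, b4) (idxB p) p = (b0 ++ [p], b1, b2, b3, b4) := by simp [pushB, h]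
      rw [hp, ih]; simp [List.filter_cons, h]
    · have hp : pushB (b0, b1, b2, b3, b4) (idxB p) p = (b0, b1 ++ [p], b2, b3, b4) := by simp [pushB, h]
      rw [hp, ih]; simp [List.filter_cons, h]
    · have hp : pushB (b0, b1, b2, b3, b4) (idxB p) p = (b0, b1, b2 ++ [p], b3, b4) := by simp [pushB, h]
      rw [hp, ih]; simp [List.filter_cons, h]
    · have hp : pushB (b0, b1, b2, b3, b4) (idxB p) p = (b0, b1, b2, b3 ++ [p], b4) := by simp [pushB, h]
      rw [hp, ih]; simp [List.filter_cons, h]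
    · have hp : pushB (b0, b1, b2, b3, b4) (idxB p) p = (b0, b1, b2, b3, b4 ++ [p]) := by simp [pushB, h]
      rw [hp, ih]; simp [List.filter_cons, h]

-- the ordered provider lists of the two programs coincide
lemma ordered_eq (xs : List (List (String × String))) :
    (xs.foldl (fun b p => pushB b (idxB p) p) ([], [], [], [], [])).1
      ++ (xs.foldl (fun b p => pushB b (idxB p) p) ([], [], [], [], [])).2.1
      ++ (xs.foldl (fun b p => pushB b (idxB p) p) ([], [], [], [], [])).2.2.1
      ++ (xs.foldl (fun b p => pushB b (idxB p) p) ([], [], [], [], [])).2.2.2.1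
      ++ (xs.foldl (fun b p => pushB b (idxB p) p) ([], [], [], [], [])).2.2.2.2
      = PySem.List.sorted xs keyA false := by
  rw [buckets_spec, sorted_buckets]
  have e0 : ∀ p, (idxB p == (0:Int)) = (keyA p == 0) := by
    intro p; rcases key_idx_cases p with ⟨h1, h2⟩ | ⟨h1, h2⟩ | ⟨h1, h2⟩ | ⟨h1, h2⟩ | ⟨h1, h2⟩ <;> simp [h1, h2]
  have e1 : ∀ p, (idxB p == (1:Int)) = (keyA p == 1) := by
    intro p; rcases key_idx_cases p with ⟨h1, h2⟩ | ⟨h1, h2⟩ | ⟨h1, h2⟩ | ⟨h1, h2⟩ | ⟨h1, h2⟩ <;> simp [h1, h2]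
  have e2 : ∀ p, (idxB p == (2:Int)) = (keyA p == 2) := by
    intro p; rcases key_idx_cases p with ⟨h1, h2⟩ | ⟨h1, h2⟩ | ⟨h1, h2⟩ | ⟨h1, h2⟩ | ⟨h1, h2⟩ <;> simp [h1, h2]
  have e3 : ∀ p, (idxB p == (3:Int)) = (keyA p == 3) := by
    intro p; rcases key_idx_cases p with ⟨h1, h2⟩ | ⟨h1, h2⟩ | ⟨h1, h2⟩ | ⟨h1, h2⟩ | ⟨h1, h2⟩ <;> simp [h1, h2]
  have e4 : ∀ p, (idxB p == (4:Int)) = (keyA p == 9) := by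
    intro p; rcases key_idx_cases p with ⟨h1, h2⟩ | ⟨h1, h2⟩ | ⟨h1, h2⟩ | ⟨h1, h2⟩ | ⟨h1, h2⟩ <;> simp [h1, h2]
  simp only [List.filter_congr (fun p _ => e0 p), List.filter_congr (fun p _ => e1 p),
    List.filter_congr (fun p _ => e2 p), List.filter_congr (fun p _ => e3 p),
    List.filter_congr (fun p _ => e4 p), List.append_assoc]
  simp

-- the formatted line for one provider is the same in both programs
lemma fmt_eq (p : List (String × String)) : fmtA p = lineB p := by
  simp only [fmtA, lineB]
  rw [b_eq, esc_eq]
  have hbadge : badgeA = badgeB := rfl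
  rw [hbadge]
  split <;> simp [esc_eq]

-- "\n".join(header :: items ++ ["", footer])
lemma join_shape (h f : List Char) (l : List (List Char)) :
    PySem.Chars.join ['\n'] (h :: (l ++ [[], f]))
      = h ++ l.flatMap (fun s => '\n' :: s) ++ '\n' :: '\n' :: f := by
  induction l generalizing h with
  | nil =>
    rw [List.nil_append, PySem.Chars.join_cons_cons, PySem.Chars.join_cons_cons]
    simp [PySem.Chars.join, List.intercalate]
  | cons c l ih =>
    rw [List.cons_append, PySem.Chars.join_cons_cons, ih c]
    simp

-- ===== VERDICT (by name: the statement is the Claim_ definition above) =====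
theorem provider_list_card_spec : Claim_equal_provider_list_card := by
  intro providers page total _
  unfold Spec_provider_list_card
  simp only [provider_list_card, provider_list_card_alt]
  rw [ordered_eq]
  rw [PySem.List.foldl_append_singleton_eq_map]
  rw [PySem.List.foldl_append_eq_flatMap (fun p => '\n' :: lineB p)]
  simp only [List.append_assoc, List.singleton_append, List.cons_append, List.nil_append]
  rw [join_shape]
  rw [b_eq, esc_eq]
  congr 1
  rw [List.flatMap_map, show (fun a => '\n' :: fmtA a) = (fun p => '\n' :: lineB p) from funext fun p => by rw [fmt_eq]]
  rw [show ('\n' :: '\n' :: "Use /provider NAME for full intelligence card".toList) = "\n\nUse /provider NAME for full intelligence card".toList from by decide]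
  simp [List.append_assoc]
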